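-- pv_equiv track=rewrite | github.com/zofialuther/CS8395-08-Paper1-updated | data/translated-code/direct-translations/prolog-to-python/Range-expansion.py | get_Range
-- ===== SOURCE A (Python) =====
-- def get_Range(X, EC, Range):
--     if not X:
--         return Range, [], []
--     elif X[0] == ',':
--         return Range, [], X[1:]
--     else:
--         new_EC = EC + [X[0]]
--         return get_Range(X[1:], new_EC, Range)
-- ===== SOURCE B (Python) =====
-- def get_Range(X, EC, Range):
--     for i, c in enumerate(X):
--         if c == ',':
--             return Range, [], X[i+1:]
--     return Range, [], []
-- ===== Notes on version B (the rewrite author's own statement) =====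
-- stated objective: faster
-- what changed: Replaces the tail recursion (which copies X[1:] and threads a dead EC accumulator at every step) with a single enumerate loop that returns the slice after the first comma, dropping the EC accumulation entirely.
import Mathlib
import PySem

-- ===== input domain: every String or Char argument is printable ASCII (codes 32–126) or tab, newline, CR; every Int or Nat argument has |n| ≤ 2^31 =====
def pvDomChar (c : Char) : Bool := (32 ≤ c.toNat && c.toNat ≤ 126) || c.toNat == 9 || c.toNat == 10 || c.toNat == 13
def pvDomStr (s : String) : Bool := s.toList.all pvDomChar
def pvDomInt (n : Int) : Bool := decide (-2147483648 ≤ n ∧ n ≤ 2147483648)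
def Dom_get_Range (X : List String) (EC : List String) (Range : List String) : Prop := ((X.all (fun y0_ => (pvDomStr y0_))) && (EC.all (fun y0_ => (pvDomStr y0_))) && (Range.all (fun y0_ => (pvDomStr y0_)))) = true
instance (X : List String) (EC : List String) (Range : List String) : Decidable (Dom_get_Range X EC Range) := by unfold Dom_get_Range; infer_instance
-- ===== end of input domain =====

-- ===== PORT A =====
-- A returns Range,[],[] on empty X; on a leading comma returns Range,[],X[1:]; else recurses on X[1:] with EC + [X[0]].
def get_Range (X : List String) (EC : List String) (Range : List String) : List String × List String × List String :=
  match X with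
  | [] => (Range, [], [])
  | x :: rest =>
    if x = "," then (Range, [], rest)
    else get_Range rest (EC ++ [x]) Range

-- ===== PORT B =====
-- B: iterate over enumerate(X); on the first comma return Range, [], X[i+1:]; else Range, [], [].
def get_Range_altGo (X : List String) (Range : List String) : List (Int × String) → List String × List String × List String
  | [] => (Range, [], [])
  | (i, c) :: rest =>
    if c = "," then (Range, [], PySem.List.slice X (some (i + 1)) none)
    else get_Range_altGo X Range rest

def get_Range_alt (X : List String) (_EC : List String) (Range : List String) : List String × List String × List String :=
  get_Range_altGo X Range (PySem.List.enumerate X 0)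

-- ===== PRECONDITION & SPEC =====
def Spec_get_Range (X : List String) (EC : List String) (Range : List String) (out : List String × List String × List String) : Prop := out = get_Range_alt X EC Range
instance (X : List String) (EC : List String) (Range : List String) (out : List String × List String × List String) : Decidable (Spec_get_Range X EC Range out) := by unfold Spec_get_Range; infer_instance

-- ===== CLAIM (what is proved, stated in full; the proofs are below) =====
def Claim_equal_get_Range : Prop := ∀ (X : List String) (EC : List String) (Range : List String), Dom_get_Range X EC Range → Spec_get_Range X EC Range (get_Range X EC Range)

-- ===== LEMMAS AND PROOFS =====

-- ===== VERDICT (by name: the statement is the Claim_ definition above) =====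
-- A's result does not depend on EC
lemma get_Range_EC_irrel : ∀ (X EC EC' Range : List String),
    get_Range X EC Range = get_Range X EC' Range := by
  intro X
  induction X with
  | nil => intro _ _ _; rfl
  | cons x rest ih =>
    intro EC EC' Range
    simp only [get_Range]
    split_ifs with h
    · rfl
    · exact ih _ _ _

lemma get_Range_altGo_drop : ∀ (xs : List String) (k : Nat) (X Range : List String),
    X.drop k = xs →
    get_Range_altGo X Range (PySem.List.enumerate xs (k : Int)) = get_Range xs [] Range := by
  intro xs
  induction xs with
  | nil => intro k X Range _; rfl
  | cons c rest ih =>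
    intro k X Range hdrop
    rw [PySem.List.enumerate_cons]
    simp only [get_Range_altGo, get_Range]
    split_ifs with h
    · have hcast : (k : Int) + 1 = ((k + 1 : Nat) : Int) := by push_cast; ring
      rw [hcast, PySem.List.slice_from_natCast]
      have : X.drop (k + 1) = rest := by
        have h2 : List.drop 1 (List.drop k X) = rest := by rw [hdrop]; rfl
        rw [List.drop_drop] at h2
        simpa [Nat.add_comm] using h2
      rw [this]
    · have hcast : (k : Int) + 1 = ((k + 1 : Nat) : Int) := by push_cast; ring
      rw [hcast]
      have hdrop' : X.drop (k + 1) = rest := by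
        have h2 : List.drop 1 (List.drop k X) = rest := by rw [hdrop]; rfl
        rw [List.drop_drop] at h2
        simpa [Nat.add_comm] using h2
      rw [ih (k + 1) X Range hdrop']
      exact (get_Range_EC_irrel rest [c] [] Range).symm

theorem get_Range_spec : Claim_equal_get_Range := by
  intro X EC Range _
  unfold Spec_get_Range get_Range_alt
  rw [show ((0 : Int)) = ((0 : Nat) : Int) from rfl,
      get_Range_altGo_drop X 0 X Range (by simp)]
  exact get_Range_EC_irrel X EC [] Range
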